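-- pv_equiv track=rewrite | github.com/jmegner/CheckioPuzzles | cipher-crossword.py | getConsistentClueValToLetter
-- ===== SOURCE A (Python) =====
-- def getConsistentClueValToLetter(lineWords, lineClues):
--     clueValToLetter = {}
--     letterToClueVal = {}
--
--     for lineWord, lineClue in zip(lineWords, lineClues):
--         for letter, clueVal in zip(lineWord, lineClue):
--             if clueValToLetter.setdefault(clueVal, letter) != letter:
--                 return None
--             if letterToClueVal.setdefault(letter, clueVal) != clueVal:
--                 return None
--
--     clueValToLetter[0] = ' '
--     return clueValToLetter
-- ===== SOURCE B (Python) =====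
-- def getConsistentClueValToLetter(lineWords, lineClues):
--     pairs = [(clueVal, letter)
--              for word, clue in zip(lineWords, lineClues)
--              for letter, clueVal in zip(word, clue)]
--
--     distinct = set(pairs)
--     if not (len(distinct) == len({cv for cv, _ in distinct})
--                           == len({letter for _, letter in distinct})):
--         return None
--
--     mapping = dict(pairs)
--     mapping[0] = ' '
--     return mapping
-- ===== Notes on version B (the rewrite author's own statement) =====
-- stated objective: alternative
-- what changed: Replaces A's incremental two-dict consistency checking inside the scan by a staged algorithm: flatten all (clueVal, letter) pairs first, accept iff |set(pairs)| == |set(clueVals)| == |set(letters)| (a global cardinality check on the deduplicated pair set), and only then build the dict in one final pass.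
import Mathlib
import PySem

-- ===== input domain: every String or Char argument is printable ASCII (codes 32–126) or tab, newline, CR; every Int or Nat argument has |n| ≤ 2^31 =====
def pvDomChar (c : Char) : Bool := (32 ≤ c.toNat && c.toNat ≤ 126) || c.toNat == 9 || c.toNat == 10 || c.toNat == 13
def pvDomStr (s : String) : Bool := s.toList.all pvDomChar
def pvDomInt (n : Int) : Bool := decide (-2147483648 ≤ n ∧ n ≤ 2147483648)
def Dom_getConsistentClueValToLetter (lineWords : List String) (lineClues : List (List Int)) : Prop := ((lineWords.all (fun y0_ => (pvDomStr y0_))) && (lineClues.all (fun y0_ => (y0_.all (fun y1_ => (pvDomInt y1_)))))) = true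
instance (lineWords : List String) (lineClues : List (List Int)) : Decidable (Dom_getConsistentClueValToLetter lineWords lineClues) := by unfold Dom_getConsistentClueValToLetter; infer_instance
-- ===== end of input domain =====

-- B replaces A's incremental two-dict consistency loop by a different algorithm: flatten all (clueVal, letter)
-- pairs, accept iff |set(pairs)| = |set(clueVals)| = |set(letters)| (a global cardinality check), then build the
-- dict in one final pass; objective: alternative (same O(n) cost, no incremental checking).


-- ===== PORT A =====
-- inner 'for letter, clueVal in zip(lineWord, lineClue)' loop carrying both dicts; none = 'return None'
def pvA_inner : List (Char × Int) → PySem.Dict Int String × PySem.Dict String Int →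
    Option (PySem.Dict Int String × PySem.Dict String Int)
  | [], st => some st
  | (letter, clueVal) :: rest, (cvl, lcv) =>
    let ltr : String := String.ofList [letter]
    -- clueValToLetter.setdefault(clueVal, letter): the returned value, then the updated dict
    let r1 := (cvl.get? clueVal).getD ltr
    let cvl := cvl.setdefault clueVal ltr
    if r1 ≠ ltr then none
    else
      -- letterToClueVal.setdefault(letter, clueVal)
      let r2 := (lcv.get? ltr).getD clueVal
      let lcv := lcv.setdefault ltr clueVal
      if r2 ≠ clueVal then none
      else pvA_inner rest (cvl, lcv)

-- outer 'for lineWord, lineClue in zip(lineWords, lineClues)' loop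
def pvA_outer : List (String × List Int) → PySem.Dict Int String × PySem.Dict String Int →
    Option (PySem.Dict Int String × PySem.Dict String Int)
  | [], st => some st
  | (w, c) :: rest, st =>
    match pvA_inner (w.toList.zip c) st with
    | none => none
    | some st' => pvA_outer rest st'

def getConsistentClueValToLetter (lineWords : List String) (lineClues : List (List Int)) : Option (List (Int × String)) :=
  match pvA_outer (lineWords.zip lineClues) (PySem.Dict.empty, PySem.Dict.empty) with
  | none => none
  | some (cvl, _) => some ((cvl.insert 0 " ").items)

-- ===== PORT B =====
-- the flattened pair list: [(clueVal, letter) for word, clue in zip(...) for letter, clueVal in zip(word, clue)]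
def pvPairs (lineWords : List String) (lineClues : List (List Int)) : List (Int × String) :=
  (lineWords.zip lineClues).flatMap (fun wc => (wc.1.toList.zip wc.2).map (fun p => (p.2, String.ofList [p.1])))

-- dict(ps): insert every pair left to right (last value wins), = Python dict(ps)
def pvDictOf {κ ν : Type} [BEq κ] (ps : List (κ × ν)) : PySem.Dict κ ν :=
  ps.foldl (fun d p => d.insert p.1 p.2) PySem.Dict.empty

def getConsistentClueValToLetter_alt (lineWords : List String) (lineClues : List (List Int)) : Option (List (Int × String)) :=
  let pairs := pvPairs lineWords lineClues
  let distinct := PySem.Set.ofList pairs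
  -- if not (len(distinct) == len({cv ...}) == len({letter ...})): return None
  if ¬ (distinct.length = (PySem.Set.ofList (distinct.map (fun p => p.1))).length ∧
        (PySem.Set.ofList (distinct.map (fun p => p.1))).length = (PySem.Set.ofList (distinct.map (fun p => p.2))).length)
  then none
  else some (((pvDictOf pairs).insert 0 " ").items)

-- ===== PRECONDITION & SPEC =====
def Spec_getConsistentClueValToLetter (lineWords : List String) (lineClues : List (List Int)) (out : Option (List (Int × String))) : Prop := out = getConsistentClueValToLetter_alt lineWords lineClues
instance (lineWords : List String) (lineClues : List (List Int)) (out : Option (List (Int × String))) : Decidable (Spec_getConsistentClueValToLetter lineWords lineClues out) := by unfold Spec_getConsistentClueValToLetter; infer_instance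

-- ===== CLAIM (what is proved, stated in full; the proofs are below) =====
def Claim_equal_getConsistentClueValToLetter : Prop := ∀ (lineWords : List String) (lineClues : List (List Int)), Dom_getConsistentClueValToLetter lineWords lineClues → Spec_getConsistentClueValToLetter lineWords lineClues (getConsistentClueValToLetter lineWords lineClues)

-- ===== LEMMAS AND PROOFS =====

-- global consistency of a pair list: equal clue values iff equal letters
def pvConsP (ps : List (Int × String)) : Prop :=
  ∀ p ∈ ps, ∀ q ∈ ps, (p.1 = q.1 ↔ p.2 = q.2)

-- A's inner loop, flattened to a single pair stream (proved equal to pvA_inner/pvA_outer below)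
def pvA_flat : List (Int × String) → PySem.Dict Int String × PySem.Dict String Int →
    Option (PySem.Dict Int String × PySem.Dict String Int)
  | [], st => some st
  | (cv, l) :: rest, (d, r) =>
    if (d.get? cv).getD l ≠ l then none
    else if (r.get? l).getD cv ≠ cv then none
    else pvA_flat rest (d.setdefault cv l, r.setdefault l cv)

theorem pvInnerFlat : ∀ (P : List (Char × Int)) (st : PySem.Dict Int String × PySem.Dict String Int),
    pvA_inner P st = pvA_flat (P.map (fun p => (p.2, String.ofList [p.1]))) st
  | [], st => by simp [pvA_inner, pvA_flat]
  | (letter, clueVal) :: rest, (cvl, lcv) => by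
    simp only [pvA_inner, pvA_flat, List.map_cons]
    split_ifs with h1 h2
    · rfl
    · rfl
    · exact pvInnerFlat rest _

theorem pvFlatAppend : ∀ (xs ys : List (Int × String)) (st : PySem.Dict Int String × PySem.Dict String Int),
    pvA_flat (xs ++ ys) st = (pvA_flat xs st).bind (fun st' => pvA_flat ys st')
  | [], ys, st => by simp [pvA_flat]
  | (cv, l) :: rest, ys, (d, r) => by
    simp only [List.cons_append, pvA_flat]
    split_ifs
    · rfl
    · rfl
    · exact pvFlatAppend rest ys _

theorem pvOuterFlat : ∀ (rows : List (String × List Int)) (st : PySem.Dict Int String × PySem.Dict String Int),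
    pvA_outer rows st =
      pvA_flat (rows.flatMap (fun wc => (wc.1.toList.zip wc.2).map (fun p => (p.2, String.ofList [p.1])))) st
  | [], st => by simp [pvA_outer, pvA_flat]
  | (w, c) :: rest, st => by
    simp only [pvA_outer, List.flatMap_cons, pvFlatAppend, ← pvInnerFlat]
    cases pvA_inner (w.toList.zip c) st with
    | none => rfl
    | some st' => exact pvOuterFlat rest st'

-- pvDictOf facts --------------------------------------------------------------

theorem pvDictOf_concat {κ ν : Type} [BEq κ] (ps : List (κ × ν)) (p : κ × ν) :
    pvDictOf (ps ++ [p]) = (pvDictOf ps).insert p.1 p.2 := by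
  simp [pvDictOf, List.foldl_append]

theorem pvDictOf_nodup_keys {κ ν : Type} [BEq κ] [LawfulBEq κ] (ps : List (κ × ν)) :
    (pvDictOf ps).keys.Nodup := by
  induction ps using List.reverseRecOn with
  | nil => exact PySem.Dict.nodup_keys_empty
  | append_singleton ps p ih => rw [pvDictOf_concat]; exact PySem.Dict.nodup_keys_insert _ _ _ ih

theorem pvGet_none_iff {κ ν : Type} [BEq κ] [LawfulBEq κ] [DecidableEq κ] (ps : List (κ × ν)) (k : κ) :
    (pvDictOf ps).get? k = none ↔ k ∉ ps.map Prod.fst := by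
  induction ps using List.reverseRecOn with
  | nil => simp [pvDictOf, List.foldl_nil, PySem.Dict.get?_empty]
  | append_singleton ps p ih =>
    rw [pvDictOf_concat, PySem.Dict.get?_insert]
    by_cases h : k = p.1 <;> simp [h, ih]

theorem pvGet_some_mem {κ ν : Type} [BEq κ] [LawfulBEq κ] [DecidableEq κ] (ps : List (κ × ν)) (k : κ) (v : ν) :
    (pvDictOf ps).get? k = some v → (k, v) ∈ ps := by
  induction ps using List.reverseRecOn with
  | nil => simp [pvDictOf, List.foldl_nil, PySem.Dict.get?_empty]
  | append_singleton ps p ih =>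
    rw [pvDictOf_concat, PySem.Dict.get?_insert]
    by_cases h : k = p.1
    · subst h
      intro hv
      simp at hv
      subst hv
      simp
    · rw [if_neg h]
      intro hv
      exact List.mem_append_left _ (ih hv)

theorem pvGet_mem {κ ν : Type} [BEq κ] [LawfulBEq κ] [DecidableEq κ] (ps : List (κ × ν))
    (hfun : ∀ p ∈ ps, ∀ q ∈ ps, p.1 = q.1 → p.2 = q.2) (k : κ) (v : ν) (h : (k, v) ∈ ps) :
    (pvDictOf ps).get? k = some v := by
  rcases hg : (pvDictOf ps).get? k with _ | v'
  · exact absurd (List.mem_map.mpr ⟨(k, v), h, rfl⟩) ((pvGet_none_iff ps k).mp hg)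
  · have hm := pvGet_some_mem ps k v' hg
    have := hfun (k, v') hm (k, v) h rfl
    simp_all

theorem pvInsert_self {κ ν : Type} [BEq κ] [LawfulBEq κ] (d : PySem.Dict κ ν) (k : κ) (v : ν)
    (hnd : d.keys.Nodup) (h : d.get? k = some v) : d.insert k v = d := by
  apply PySem.Dict.ext
  have hc : d.contains k = true := by rw [PySem.Dict.contains_eq_isSome_get?, h]; rfl
  rw [PySem.Dict.items_insert_of_contains d _ hc]
  have : ∀ p ∈ d.items, (if p.1 == k then (k, v) else p) = p := by
    rintro ⟨k', v'⟩ hp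
    by_cases hk : k' = k
    · subst hk
      have := PySem.Dict.get?_of_mem_items d hp hnd
      rw [h] at this
      simp_all
    · simp [hk]
  calc d.items.map (fun p => if p.1 == k then (k, v) else p)
      = d.items.map id := List.map_congr_left this
    _ = d.items := List.map_id _

-- the main correspondence: running A's flattened loop from the dicts of a consistent prefix
theorem pvFlatEq : ∀ (P pre : List (Int × String)), pvConsP pre →
    (pvConsP (pre ++ P) →
      pvA_flat P (pvDictOf pre, pvDictOf (pre.map Prod.swap)) =
        some (pvDictOf (pre ++ P), pvDictOf ((pre ++ P).map Prod.swap))) ∧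
    (¬ pvConsP (pre ++ P) →
      pvA_flat P (pvDictOf pre, pvDictOf (pre.map Prod.swap)) = none)
  | [], pre, hpre => by
    constructor
    · intro _; simp [pvA_flat]
    · intro h; exact absurd (by simpa using hpre) h
  | (cv, l) :: rest, pre, hpre => by
    have hfun : ∀ p ∈ pre, ∀ q ∈ pre, p.1 = q.1 → p.2 = q.2 :=
      fun p hp q hq h => (hpre p hp q hq).mp h
    have hfun' : ∀ p ∈ pre.map Prod.swap, ∀ q ∈ pre.map Prod.swap, p.1 = q.1 → p.2 = q.2 := by
      simp only [List.mem_map]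
      rintro p ⟨a, ha, rfl⟩ q ⟨b, hb, rfl⟩ h
      exact (hpre a ha b hb).mpr h
    have hassoc : pre ++ (cv, l) :: rest = (pre ++ [(cv, l)]) ++ rest := by simp
    simp only [pvA_flat]
    rcases hd : (pvDictOf pre).get? cv with _ | l0
    · -- cv not yet used
      have hcv : cv ∉ pre.map Prod.fst := (pvGet_none_iff pre cv).mp hd
      have hdc : (pvDictOf pre).contains cv = false := by
        rw [PySem.Dict.contains_eq_isSome_get?, hd]; rfl
      rcases hr : (pvDictOf (pre.map Prod.swap)).get? l with _ | cv0
      · -- l not yet used either: lockstep step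
        have hl : l ∉ pre.map Prod.snd := by
          have := (pvGet_none_iff (pre.map Prod.swap) l).mp hr
          simpa [List.map_map, Function.comp] using this
        have hrc : (pvDictOf (pre.map Prod.swap)).contains l = false := by
          rw [PySem.Dict.contains_eq_isSome_get?, hr]; rfl
        have hpre' : pvConsP (pre ++ [(cv, l)]) := by
          intro p hp q hq
          rcases List.mem_append.mp hp with hp | hp <;> rcases List.mem_append.mp hq with hq | hq
          · exact hpre p hp q hq
          · simp only [List.mem_singleton] at hq; subst hq
            constructor
            · intro h; exact absurd (List.mem_map.mpr ⟨p, hp, h⟩) hcv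
            · intro h; exact absurd (List.mem_map.mpr ⟨p, hp, h⟩) hl
          · simp only [List.mem_singleton] at hp; subst hp
            constructor
            · intro h; exact absurd (List.mem_map.mpr ⟨q, hq, h.symm⟩) hcv
            · intro h; exact absurd (List.mem_map.mpr ⟨q, hq, h.symm⟩) hl
          · simp only [List.mem_singleton] at hp hq; subst hp; subst hq; simp
        have hstep : (pvDictOf pre).setdefault cv l = pvDictOf (pre ++ [(cv, l)]) := by
          rw [PySem.Dict.setdefault_of_not_contains _ _ hdc, pvDictOf_concat]
        have hstep' : (pvDictOf (pre.map Prod.swap)).setdefault l cv =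
            pvDictOf ((pre ++ [(cv, l)]).map Prod.swap) := by
          rw [PySem.Dict.setdefault_of_not_contains _ _ hrc]
          simp [pvDictOf_concat, Prod.swap]
        have ih := pvFlatEq rest (pre ++ [(cv, l)]) hpre'
        simp only [Option.getD_none, ne_eq, not_true_eq_false]
        rw [hstep, hstep']
        constructor
        · intro hc
          rw [hassoc] at hc ⊢
          exact ih.1 hc
        · intro hc
          rw [hassoc] at hc
          exact ih.2 hc
      · -- l already maps to some cv0; cv0 ≠ cv since cv is fresh: A fails, and consistency fails
        have hm : (cv0, l) ∈ pre := by
          have := pvGet_some_mem (pre.map Prod.swap) l cv0 hr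
          simp only [List.mem_map] at this
          rcases this with ⟨⟨a, b⟩, hab, he⟩
          simp only [Prod.swap] at he
          obtain ⟨h1, h2⟩ := Prod.mk.injEq .. ▸ he
          simp_all
        have hne : cv0 ≠ cv := by
          intro h; subst h
          exact hcv (List.mem_map.mpr ⟨(cv0, l), hm, rfl⟩)
        have hnc : ¬ pvConsP (pre ++ (cv, l) :: rest) := by
          intro hc
          have := hc (cv0, l) (List.mem_append_left _ hm) (cv, l)
            (List.mem_append_right _ (List.mem_cons_self ..))
          exact hne (this.mpr rfl)
        refine ⟨fun hc => absurd hc hnc, fun _ => ?_⟩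
        simp [hne]
    · -- cv already maps to l0
      have hm0 : (cv, l0) ∈ pre := pvGet_some_mem pre cv l0 hd
      by_cases hl0 : l0 = l
      · subst hl0
        -- same letter: both checks pass, both dicts unchanged
        have hr : (pvDictOf (pre.map Prod.swap)).get? l0 = some cv :=
          pvGet_mem (pre.map Prod.swap) hfun' l0 cv
            (List.mem_map.mpr ⟨(cv, l0), hm0, rfl⟩)
        have hdc : (pvDictOf pre).contains cv = true := by
          rw [PySem.Dict.contains_eq_isSome_get?, hd]; rfl
        have hrc : (pvDictOf (pre.map Prod.swap)).contains l0 = true := by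
          rw [PySem.Dict.contains_eq_isSome_get?, hr]; rfl
        have hpre' : pvConsP (pre ++ [(cv, l0)]) := by
          intro p hp q hq
          have hmem : ∀ x, x ∈ pre ++ [(cv, l0)] → x ∈ pre := by
            intro x hx
            rcases List.mem_append.mp hx with hx | hx
            · exact hx
            · simp only [List.mem_singleton] at hx; subst hx; exact hm0
          exact hpre p (hmem p hp) q (hmem q hq)
        have hstep : (pvDictOf pre).setdefault cv l0 = pvDictOf (pre ++ [(cv, l0)]) := by
          rw [PySem.Dict.setdefault_of_contains _ _ hdc, pvDictOf_concat,
            pvInsert_self _ _ _ (pvDictOf_nodup_keys pre) hd]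
        have hstep' : (pvDictOf (pre.map Prod.swap)).setdefault l0 cv =
            pvDictOf ((pre ++ [(cv, l0)]).map Prod.swap) := by
          rw [PySem.Dict.setdefault_of_contains _ _ hrc]
          simp only [List.map_append, List.map_cons, List.map_nil, Prod.swap]
          rw [pvDictOf_concat]
          exact (pvInsert_self _ _ _ (pvDictOf_nodup_keys _) hr).symm
        have ih := pvFlatEq rest (pre ++ [(cv, l0)]) hpre'
        rw [hr]
        simp only [Option.getD_some, ne_eq, not_true_eq_false]
        rw [hstep, hstep']
        constructor
        · intro hc
          rw [hassoc] at hc ⊢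
          exact ih.1 hc
        · intro hc
          rw [hassoc] at hc
          exact ih.2 hc
      · -- different letter: A fails at the first check, and consistency fails
        have hnc : ¬ pvConsP (pre ++ (cv, l) :: rest) := by
          intro hc
          have := hc (cv, l0) (List.mem_append_left _ hm0) (cv, l)
            (List.mem_append_right _ (List.mem_cons_self ..))
          exact hl0 (this.mp rfl)
        refine ⟨fun hc => absurd hc hnc, fun _ => ?_⟩
        simp [hl0]

-- |set(xs)| = |xs| iff xs has no duplicates
theorem pvSetLen {α : Type} [DecidableEq α] (xs : List α) :
    (PySem.Set.ofList xs).length = xs.length ↔ xs.Nodup := by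
  have hperm : (PySem.Set.ofList xs).Perm xs.dedup := by
    rw [List.perm_ext_iff_of_nodup (PySem.Set.nodup_ofList xs) xs.nodup_dedup]
    intro a; simp [PySem.Set.mem_ofList]
  constructor
  · intro hlen
    have h1 : xs.dedup.length = xs.length := by rw [← hperm.length_eq, hlen]
    have := List.Sublist.eq_of_length xs.dedup_sublist h1
    rw [← this]; exact xs.nodup_dedup
  · intro hnd
    rw [PySem.Set.ofList_eq_self_of_nodup _ hnd]

-- B's cardinality check holds iff the pair list is consistent
theorem pvConsIff (pairs : List (Int × String)) :
    (((PySem.Set.ofList pairs).map (fun p : Int × String => p.1)).Nodup ∧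
     ((PySem.Set.ofList pairs).map (fun p : Int × String => p.2)).Nodup) ↔ pvConsP pairs := by
  have hS : ∀ x, x ∈ PySem.Set.ofList pairs ↔ x ∈ pairs := fun x => PySem.Set.mem_ofList pairs x
  have hnd : (PySem.Set.ofList pairs).Nodup := PySem.Set.nodup_ofList pairs
  constructor
  · rintro ⟨h1, h2⟩ p hp q hq
    have hp' := (hS p).mpr hp
    have hq' := (hS q).mpr hq
    constructor
    · intro h
      have := List.inj_on_of_nodup_map h1 hp' hq' h
      rw [this]
    · intro h
      have := List.inj_on_of_nodup_map h2 hp' hq' h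
      rw [this]
  · intro hc
    constructor
    · apply List.Nodup.map_on _ hnd
      intro p hp q hq h
      have := (hc p ((hS p).mp hp) q ((hS q).mp hq)).mp h
      exact Prod.ext h this
    · apply List.Nodup.map_on _ hnd
      intro p hp q hq h
      have := (hc p ((hS p).mp hp) q ((hS q).mp hq)).mpr h
      exact Prod.ext this h

-- B's value on consistent / inconsistent pair lists
theorem pvAlt_pos (lineWords : List String) (lineClues : List (List Int))
    (h : pvConsP (pvPairs lineWords lineClues)) :
    getConsistentClueValToLetter_alt lineWords lineClues =
      some (((pvDictOf (pvPairs lineWords lineClues)).insert 0 " ").items) := by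
  obtain ⟨h1, h2⟩ := (pvConsIff (pvPairs lineWords lineClues)).mpr h
  simp only [getConsistentClueValToLetter_alt]
  split_ifs with hcond
  · rfl
  · exfalso
    apply hcond
    constructor
    · rw [PySem.Set.ofList_eq_self_of_nodup _ h1, List.length_map]
    · rw [PySem.Set.ofList_eq_self_of_nodup _ h1, PySem.Set.ofList_eq_self_of_nodup _ h2,
        List.length_map, List.length_map]

theorem pvAlt_neg (lineWords : List String) (lineClues : List (List Int))
    (h : ¬ pvConsP (pvPairs lineWords lineClues)) :
    getConsistentClueValToLetter_alt lineWords lineClues = none := by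
  simp only [getConsistentClueValToLetter_alt]
  split_ifs with hcond
  · exfalso
    obtain ⟨c1, c2⟩ := hcond
    apply h
    apply (pvConsIff _).mp
    constructor
    · exact (pvSetLen _).mp (by rw [List.length_map, ← c1])
    · exact (pvSetLen _).mp (by rw [List.length_map, ← c2, ← c1])
  · rfl

-- ===== VERDICT (by name: the statement is the Claim_ definition above) =====
theorem getConsistentClueValToLetter_spec : Claim_equal_getConsistentClueValToLetter := by
  intro lineWords lineClues _
  unfold Spec_getConsistentClueValToLetter getConsistentClueValToLetter
  rw [pvOuterFlat]
  have hfold : pvPairs lineWords lineClues =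
      List.flatMap (fun wc => List.map (fun p => (p.2, String.ofList [p.1])) (wc.1.toList.zip wc.2))
        (lineWords.zip lineClues) := rfl
  rw [← hfold]
  have hflat := pvFlatEq (pvPairs lineWords lineClues) [] (by intro p hp; simp at hp)
  have hE : pvDictOf ([] : List (Int × String)) = PySem.Dict.empty := rfl
  have hE' : pvDictOf (([] : List (Int × String)).map Prod.swap) = PySem.Dict.empty := rfl
  by_cases hc : pvConsP (pvPairs lineWords lineClues)
  · have hA := hflat.1 (by simpa using hc)
    simp only [List.nil_append] at hA
    rw [hE, hE'] at hA
    rw [hA, pvAlt_pos lineWords lineClues hc]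
  · have hA := hflat.2 (by simpa using hc)
    rw [hE, hE'] at hA
    rw [hA, pvAlt_neg lineWords lineClues hc]
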